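-- pv_equiv track=rewrite | github.com/nuoxoxo/leetcode | leet_BTK_967_same_consec_diff.py | numsSameConsecDiff
-- ===== SOURCE A (Python) =====
-- from typing import List
--
-- def numsSameConsecDiff(n: int, k: int) -> List[int]:
--     """
--     :type n: int
--     :type k: int
--     :rtype: List[int]
--     """
--     r = []
--     def backtrack(s, n, k):
--         if len(s) == n:
--             r.append(int(s))
--             return
--         if len(s) == 0:
--             last = -1
--         else:
--             last = ord(s[-1]) - ord('0')
--         for i in range(10):
--             if last == -1 and i == 0:
--                 continue
--             if last == -1 or abs(last - i) == k:
--                 s += chr(i + ord('0'))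
--                 backtrack(s, n, k)
--                 s = s[:-1]
--     backtrack('', n, k);
--     return r
-- ===== SOURCE B (Python) =====
-- def numsSameConsecDiff(n, k):
--     cur = list(range(1, 10))
--     for _ in range(n - 1):
--         if not cur:
--             break
--         nxt = []
--         for num in cur:
--             last = num % 10
--             for d in range(10):
--                 if abs(last - d) == k:
--                     nxt.append(num * 10 + d)
--         cur = nxt
--     return cur
-- ===== Notes on version B (the rewrite author's own statement) =====
-- stated objective: simpler
-- what changed: Replaces the recursive DFS over growing digit strings (with int(s) parsing and string append/truncate backtracking) by an iterative level-by-level BFS over a list of partial numbers kept as integers, extending each by num*10+d and stopping early when the list goes empty.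
-- outside the precondition, e.g. on numsSameConsecDiff(-1, -1): A returns [], B returns [1, 2, 3, 4, 5, 6, 7, 8, 9]
import Mathlib
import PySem

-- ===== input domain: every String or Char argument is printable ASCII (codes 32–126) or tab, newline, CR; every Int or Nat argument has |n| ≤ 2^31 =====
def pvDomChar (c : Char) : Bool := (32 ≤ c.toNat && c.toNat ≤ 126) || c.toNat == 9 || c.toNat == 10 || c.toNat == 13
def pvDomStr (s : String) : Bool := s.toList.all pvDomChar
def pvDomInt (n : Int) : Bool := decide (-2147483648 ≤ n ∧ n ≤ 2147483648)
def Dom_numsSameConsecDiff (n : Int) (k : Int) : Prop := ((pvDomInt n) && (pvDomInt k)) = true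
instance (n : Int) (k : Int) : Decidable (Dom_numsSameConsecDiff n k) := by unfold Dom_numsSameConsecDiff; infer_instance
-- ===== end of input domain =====

-- B replaces A's recursive DFS over digit strings by an iterative level-by-level BFS over
-- partial numbers kept as integers (simpler: no string building, no int() parsing).

-- ===== PORT A =====
-- A's inner backtrack(s, n, k), with the result list r threaded as an accumulator and a
-- fuel guard for totality only (fuel n.toNat+1 covers every call the tree reaches, since
-- each call grows s by one char and stops at length n).  int(s) is ported by hand as the
-- digit fold, exact here because s is always a nonempty string of ASCII digits.
def pvBacktrack (fuel : Nat) (n : Int) (k : Int) (s : List Char) (r : List Int) : List Int :=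
  match fuel with
  | 0 => r
  | f + 1 =>
    if (s.length : Int) = n then
      r ++ [s.foldl (fun a c => a * 10 + ((c.toNat : Int) - 48)) 0]
    else
      let last : Int := match s.getLast? with
        | none => -1
        | some c => (c.toNat : Int) - 48
      (PySem.List.pyRange 0 10 1).foldl
        (fun r i =>
          if last = -1 ∧ i = 0 then r
          else if last = -1 ∨ ((last - i).natAbs : Int) = k then
            pvBacktrack f n k (s ++ [Char.ofNat (i + 48).toNat]) r
          else r) r

def numsSameConsecDiff (n : Int) (k : Int) : List Int :=
  pvBacktrack (n.toNat + 1) n k [] []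

-- ===== PORT B =====
def numsSameConsecDiff_alt (n : Int) (k : Int) : List Int :=
  (PySem.List.pyRange 0 (n - 1) 1).foldl
    (fun cur _ =>
      -- 'if not cur: break' — exact as an identity step, since the loop body sends [] to []
      if cur = [] then cur else
      cur.foldl
        (fun nxt num =>
          let last := PySem.Int.mod num 10
          (PySem.List.pyRange 0 10 1).foldl
            (fun nxt d => if ((last - d).natAbs : Int) = k then nxt ++ [num * 10 + d] else nxt)
            nxt)
        [])
    (PySem.List.pyRange 1 10 1)

-- ===== PRECONDITION & SPEC =====
-- Pre_ excludes n ≤ 0, outside the problem's domain of digit counts: there A raises for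
-- 0 ≤ k ≤ 9 (ValueError at n = 0, RecursionError for n < 0) and returns an accidental []
-- for every other k, while B returns its untouched seed [1..9]; neither value is specified.
def Pre_numsSameConsecDiff (n : Int) (k : Int) : Prop := 1 ≤ n
instance (n : Int) (k : Int) : Decidable (Pre_numsSameConsecDiff n k) := by
  unfold Pre_numsSameConsecDiff; infer_instance

def pvWitness_numsSameConsecDiff : Int × Int := (2, 1)

def Spec_numsSameConsecDiff (n : Int) (k : Int) (out : List Int) : Prop := out = numsSameConsecDiff_alt n k
instance (n : Int) (k : Int) (out : List Int) : Decidable (Spec_numsSameConsecDiff n k out) := by unfold Spec_numsSameConsecDiff; infer_instance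

-- ===== CLAIM (what is proved, stated in full; the proofs are below) =====
def Claim_equal_numsSameConsecDiff : Prop := ∀ (n : Int) (k : Int), Dom_numsSameConsecDiff n k → Pre_numsSameConsecDiff n k → Spec_numsSameConsecDiff n k (numsSameConsecDiff n k)

-- ===== LEMMAS AND PROOFS =====

-- the set of one-digit extensions of the partial number v (shared spec of both loops)
def pvStep (k v : Int) : List Int :=
  ((PySem.List.pyRange 0 10 1).filter (fun d => decide (((v % 10 - d).natAbs : Int) = k))).map
    (fun d => v * 10 + d)

-- all completions of v after m more digits, in DFS (= sorted) order
def pvGrow (k : Int) : Nat → Int → List Int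
  | 0, v => [v]
  | m + 1, v => (pvStep k v).flatMap (pvGrow k m)

def pvVal (s : List Char) : Int := s.foldl (fun a c => a * 10 + ((c.toNat : Int) - 48)) 0

theorem pvVal_append (s : List Char) (c : Char) :
    pvVal (s ++ [c]) = pvVal s * 10 + ((c.toNat : Int) - 48) := by
  simp [pvVal]

theorem pvVal_mod (s : List Char) (c : Char) (h : s.getLast? = some c)
    (hd : ∀ x ∈ s, 48 ≤ x.toNat ∧ x.toNat ≤ 57) :
    pvVal s % 10 = (c.toNat : Int) - 48 := by
  have hne : s ≠ [] := by intro e; simp [e] at h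
  have hc : s.getLast hne = c := by
    rw [List.getLast?_eq_some_getLast hne] at h
    exact Option.some_injective _ h
  have hs : s.dropLast ++ [c] = s := by
    rw [← hc]; exact List.dropLast_append_getLast hne
  have hb := hd c (by rw [← hs]; simp)
  have : pvVal s = pvVal s.dropLast * 10 + ((c.toNat : Int) - 48) := by
    rw [← hs, pvVal_append]; rw [hs]
  rw [this]
  omega

-- generic shape of both branchy append-folds
theorem pv_foldl_if_flat {F : List Int → Int → List Int} (p : Int → Prop) [DecidablePred p]
    (g : Int → List Int) :
    ∀ (l : List Int), (∀ i ∈ l, ∀ st, F st i = if p i then st ++ g i else st) →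
      ∀ r, l.foldl F r = r ++ (l.filter (fun i => decide (p i))).flatMap g := by
  intro l
  induction l with
  | nil => intro _ r; simp
  | cons a l ih =>
    intro h r
    simp only [List.foldl_cons, List.filter_cons]
    rw [h a (by simp), ih (fun i hi st => h i (by simp [hi]) st)]
    by_cases hp : p a <;> simp [hp]

theorem pv_char (i : Int) (h0 : 0 ≤ i) (h1 : i < 10) :
    ((Char.ofNat (i + 48).toNat).toNat : Int) = i + 48 := by
  interval_cases i <;> decide

theorem pvBacktrack_spec (k : Int) :
    ∀ (m f : Nat), m ≤ f → ∀ (s : List Char) (r : List Int) (n : Int),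
      s ≠ [] → (∀ x ∈ s, 48 ≤ x.toNat ∧ x.toNat ≤ 57) → (s.length : Int) + m = n →
      pvBacktrack (f + 1) n k s r = r ++ pvGrow k m (pvVal s) := by
  intro m
  induction m with
  | zero =>
    intro f _ s r n _ _ hlen
    have hl : (s.length : Int) = n := by omega
    simp [pvBacktrack, hl, pvGrow, pvVal]
  | succ m ih =>
    intro f hf s r n hne hd hlen
    obtain ⟨f', rfl⟩ : ∃ f', f = f' + 1 := ⟨f - 1, by omega⟩
    have hl : ¬ ((s.length : Int) = n) := by omega
    have hsome : s.getLast? = some (s.getLast hne) := List.getLast?_eq_some_getLast hne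
    have hcb := hd (s.getLast hne) (List.getLast_mem hne)
    have hmod : pvVal s % 10 = ((s.getLast hne).toNat : Int) - 48 := pvVal_mod s _ hsome hd
    rw [pvBacktrack]
    simp only [hl, if_false, hsome]
    rw [pv_foldl_if_flat (fun i => ((pvVal s % 10 - i).natAbs : Int) = k)
        (fun i => pvGrow k m (pvVal s * 10 + i))]
    · have : ((PySem.List.pyRange 0 10 1).filter
          (fun i => decide (((pvVal s % 10 - i).natAbs : Int) = k))).flatMap
            (fun i => pvGrow k m (pvVal s * 10 + i)) = pvGrow k (m + 1) (pvVal s) := by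
        rw [pvGrow, pvStep, List.flatMap_map]
      rw [this]
    · intro i hi st
      rw [PySem.List.mem_pyRange_one] at hi
      have hc := pv_char i hi.1 hi.2
      have hnz : ¬ (((s.getLast hne).toNat : Int) - 48 = -1) := by omega
      simp only [hnz, false_and, if_false, false_or]
      by_cases hp : ((pvVal s % 10 - i).natAbs : Int) = k
      · have hp' : ((((s.getLast hne).toNat : Int) - 48 - i).natAbs : Int) = k := by
          rw [← hmod]; exact hp
        rw [if_pos hp', if_pos hp]
        have := ih f' (by omega) (s ++ [Char.ofNat (i + 48).toNat]) st n
          (by simp)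
          (by intro x hx
              rcases List.mem_append.1 hx with hx | hx
              · exact hd x hx
              · simp only [List.mem_singleton] at hx
                subst hx; omega)
          (by simp; omega)
        rw [this, pvVal_append, hc]
        have : (pvVal s * 10 + (i + 48 - 48)) = pvVal s * 10 + i := by ring_nf
        rw [this]
      · have hp' : ¬ ((((s.getLast hne).toNat : Int) - 48 - i).natAbs : Int) = k := by
          rw [← hmod]; exact hp
        rw [if_neg hp', if_neg hp]

theorem pv_iterate_flatMap (k : Int) :
    ∀ (m : Nat) (cur : List Int),
      (fun c : List Int => c.flatMap (pvStep k))^[m] cur = cur.flatMap (pvGrow k m) := by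
  intro m
  induction m with
  | zero => intro cur; simp [pvGrow]
  | succ m ih =>
    intro cur
    rw [Function.iterate_succ_apply, ih]
    simp [pvGrow, List.flatMap_assoc]

theorem pv_foldl_const {α β : Type} (L : β → β) :
    ∀ (l : List α) (init : β), l.foldl (fun c _ => L c) init = L^[l.length] init := by
  intro l
  induction l with
  | nil => intro init; simp
  | cons a l ih => intro init; simp [List.foldl_cons, ih, Function.iterate_succ_apply]

theorem pv_alt_eq (n k : Int) (hn : 1 ≤ n) :
    numsSameConsecDiff_alt n k =
      (PySem.List.pyRange 1 10 1).flatMap (pvGrow k (n.toNat - 1)) := by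
  unfold numsSameConsecDiff_alt
  have hlevel : (fun (cur : List Int) (_ : Int) =>
      if cur = [] then cur else
      cur.foldl
        (fun nxt num =>
          let last := PySem.Int.mod num 10
          (PySem.List.pyRange 0 10 1).foldl
            (fun nxt d => if ((last - d).natAbs : Int) = k then nxt ++ [num * 10 + d] else nxt)
            nxt)
        []) = (fun (cur : List Int) (_ : Int) => cur.flatMap (pvStep k)) := by
    funext cur x
    by_cases hc0 : cur = []
    · simp [hc0]
    rw [if_neg hc0]
    have hone : ∀ (num : Int) (nxt : List Int),
        (PySem.List.pyRange 0 10 1).foldl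
          (fun nxt d => if ((PySem.Int.mod num 10 - d).natAbs : Int) = k then
            nxt ++ [num * 10 + d] else nxt) nxt = nxt ++ pvStep k num := by
      intro num nxt
      rw [PySem.Int.mod_eq_emod_of_pos (by norm_num : (0:Int) < 10)]
      rw [pv_foldl_if_flat (fun d => ((num % 10 - d).natAbs : Int) = k)
          (fun d => [num * 10 + d])]
      · rw [pvStep]
        congr 1
        induction ((PySem.List.pyRange 0 10 1).filter
            (fun d => decide (((num % 10 - d).natAbs : Int) = k))) with
        | nil => rfl
        | cons a l ih => rw [List.flatMap_cons, List.map_cons, ih]; rfl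
      · intro i _ st; rfl
    simp only [hone]
    rw [PySem.List.foldl_append_eq_flatMap]
    simp
  rw [hlevel, pv_foldl_const, pv_iterate_flatMap, PySem.List.length_pyRange_one]
  have h' : (n - 1 - 0).toNat = n.toNat - 1 := by omega
  rw [h']

-- ===== VERDICT (by name: the statement is the Claim_ definition above) =====
theorem numsSameConsecDiff_spec : Claim_equal_numsSameConsecDiff := by
  intro n k _ hn
  have hn' : (1 : Int) ≤ n := hn
  show numsSameConsecDiff n k = numsSameConsecDiff_alt n k
  rw [pv_alt_eq n k hn']
  obtain ⟨t, ht⟩ : ∃ t, n.toNat = t + 1 := ⟨n.toNat - 1, by omega⟩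
  unfold numsSameConsecDiff
  rw [ht, pvBacktrack]
  have h0 : ¬ ((([] : List Char).length : Int) = n) := by simp; omega
  simp only [h0, if_false, List.getLast?_nil]
  rw [pv_foldl_if_flat (fun i => ¬ i = 0) (fun i => pvGrow k t i)]
  · have hfilter : (PySem.List.pyRange 0 10 1).filter (fun i => decide (¬ i = 0)) =
        PySem.List.pyRange 1 10 1 := by decide
    rw [hfilter]
    simp
  · intro i hi st
    rw [PySem.List.mem_pyRange_one] at hi
    have hc := pv_char i hi.1 hi.2
    by_cases hz : i = 0
    · subst hz; simp
    · rw [if_neg (by simp [hz]), if_pos (by exact Or.inl trivial), if_pos hz]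
      rw [pvBacktrack_spec k t t (le_refl t) ([] ++ [Char.ofNat (i + 48).toNat]) st n
        (by simp)
        (by intro x hx; simp only [List.nil_append, List.mem_singleton] at hx; subst hx; omega)
        (by simp; omega)]
      have hv : pvVal ([] ++ [Char.ofNat (i + 48).toNat]) = i := by
        simp [pvVal]; omega
      rw [hv]
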